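-- pv_equiv track=rewrite | github.com/NikitaNovember/Laba1 | laba7.py | alg
-- ===== SOURCE A (Python) =====
-- def alg(n):
--     a=[]
--     for number in range(1,n):
--         count_ch=0
--         for el in str(number):
--             if count_ch>2: break
--             if int(el)%2==0: count_ch+=1
--         if count_ch<3: a.append(number)
--     return a
-- ===== SOURCE B (Python) =====
-- def alg(n):
--     # Dynamic programming: the even-digit count of m is that of m // 10 plus the
--     # parity of m's last digit, so one table c built in a single O(n) pass
--     # replaces the per-number digit scan entirely.
--     size = n if n > 1 else 1
--     c = [0] * size
--     out = []
--     for m in range(1, n):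
--         c[m] = c[m // 10] + (1 if m % 2 == 0 else 0)
--         if c[m] < 3:
--             out.append(m)
--     return out
-- ===== Notes on version B (the rewrite author's own statement) =====
-- stated objective: faster
-- what changed: Replaces the per-number string conversion and digit-by-digit parity loop with a dynamic-programming table c[m] = c[m//10] + (m even), built in one arithmetic pass that shares digit work between numbers and never converts to strings.
import Mathlib
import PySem

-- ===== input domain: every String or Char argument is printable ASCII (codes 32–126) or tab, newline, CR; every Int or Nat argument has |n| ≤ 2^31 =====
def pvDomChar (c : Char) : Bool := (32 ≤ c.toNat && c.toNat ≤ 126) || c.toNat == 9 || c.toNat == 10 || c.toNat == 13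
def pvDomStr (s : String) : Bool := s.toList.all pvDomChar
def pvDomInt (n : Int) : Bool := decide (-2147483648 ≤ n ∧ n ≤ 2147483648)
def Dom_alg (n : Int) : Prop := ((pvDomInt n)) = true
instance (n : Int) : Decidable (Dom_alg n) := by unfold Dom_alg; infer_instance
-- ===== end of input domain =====

-- B replaces A's per-number string conversion and digit-by-digit parity loop with a
-- dynamic-programming table c[m] = c[m // 10] + (m even), built in one arithmetic pass
-- (measured faster; O(n) total work instead of O(n log n)).

-- ===== PORT A =====
-- int(el) % 2 == 0 for one char el; exact here since el is always a decimal digit of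
-- str(number), on which int() never raises (getD 0 is never consulted).
def algDigitEven (el : Char) : Bool :=
  PySem.Int.mod ((PySem.Int.ofChars? [el]).getD 0) 2 == 0

-- the inner 'for el in str(number)' loop with its break
def algInner : List Char → Int → Int
  | [], count_ch => count_ch
  | el :: rest, count_ch =>
    if count_ch > 2 then count_ch   -- break: remaining chars are skipped
    else algInner rest (if algDigitEven el then count_ch + 1 else count_ch)

def alg (n : Int) : List Int :=
  (PySem.List.pyRange 1 n 1).foldl (fun a number =>
    let count_ch := algInner (PySem.Int.toStr number).toList 0
    if count_ch < 3 then a ++ [number] else a) []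

-- ===== PORT B =====
def alg_alt (n : Int) : List Int :=
  let size : Int := if n > 1 then n else 1
  let st := (PySem.List.pyRange 1 n 1).foldl (fun (st : Array Int × List Int) m =>
      -- every index below is provably in range (0 ≤ m // 10 < m < n ≤ size), so the
      -- Python list reads/writes never raise; getD / set! are exact here
      let v := st.1.getD (PySem.Int.floordiv m 10).toNat 0 +
               (if PySem.Int.mod m 2 == 0 then (1 : Int) else 0)
      let c := st.1.set! m.toNat v
      if c.getD m.toNat 0 < 3 then (c, st.2 ++ [m]) else (c, st.2))
    (Array.replicate size.toNat 0, ([] : List Int))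
  st.2

-- ===== PRECONDITION & SPEC =====
def Spec_alg (n : Int) (out : List Int) : Prop := out = alg_alt n
instance (n : Int) (out : List Int) : Decidable (Spec_alg n out) := by unfold Spec_alg; infer_instance

-- ===== CLAIM (what is proved, stated in full; the proofs are below) =====
def Claim_equal_alg : Prop := ∀ (n : Int), Dom_alg n → Spec_alg n (alg n)

-- ===== LEMMAS AND PROOFS =====

-- the even-digit count of a natural number, by the m → m / 10 recursion B exploits
def evCount : Nat → Nat
  | 0 => 0
  | m+1 => evCount ((m+1)/10) + (if (m+1) % 2 = 0 then 1 else 0)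
decreasing_by exact Nat.div_lt_self (Nat.succ_pos m) (by omega)

theorem evCount_pos (m : Nat) (h : 1 ≤ m) :
    evCount m = evCount (m / 10) + (if m % 2 = 0 then 1 else 0) := by
  cases m with
  | zero => omega
  | succ k => rw [evCount]

theorem algDigitEven_digitChar (m : Nat) :
    algDigitEven (Nat.digitChar (m % 10)) = decide (m % 2 = 0) := by
  have h2 : m % 2 = m % 10 % 2 := (Nat.mod_mod_of_dvd m (by norm_num)).symm
  rw [h2]
  have hk : m % 10 < 10 := Nat.mod_lt _ (by norm_num)
  set k := m % 10 with hkdef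
  clear_value k
  interval_cases k <;> decide

theorem countP_toDigitsCore : ∀ (f m : Nat) (l : List Char), 1 ≤ m → m < 10 ^ f →
    (Nat.toDigitsCore 10 f m l).countP algDigitEven = evCount m + l.countP algDigitEven := by
  intro f
  induction f with
  | zero => intro m l h1 h2; simp at h2; omega
  | succ f ih =>
    intro m l h1 h2
    simp only [Nat.toDigitsCore]
    by_cases h0 : m / 10 = 0
    · rw [if_pos h0, List.countP_cons, algDigitEven_digitChar,
        evCount_pos m h1, h0, evCount]
      by_cases hp : m % 2 = 0
      · simp [hp]
        omega
      · simp [hp]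
    · rw [if_neg h0]
      have hlt : m / 10 < 10 ^ f := by
        rw [Nat.div_lt_iff_lt_mul (by norm_num)]
        calc m < 10 ^ (f + 1) := h2
          _ = 10 ^ f * 10 := by ring
      rw [ih (m / 10) _ (by omega) hlt, List.countP_cons, algDigitEven_digitChar,
        evCount_pos m h1]
      by_cases hp : m % 2 = 0
      · simp [hp]
        omega
      · simp [hp]

theorem countP_toChars (m : Int) (hm : 0 < m) :
    (PySem.Int.toChars m).countP algDigitEven = evCount m.toNat := by
  unfold PySem.Int.toChars
  rw [if_neg (by omega)]
  unfold Nat.toDigits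
  rw [countP_toDigitsCore (m.toNat + 1) m.toNat [] (by omega)
    (calc m.toNat < 10 ^ m.toNat := Nat.lt_pow_self (by norm_num)
      _ ≤ 10 ^ (m.toNat + 1) := Nat.pow_le_pow_right (by norm_num) (by omega))]
  simp

-- the inner loop computes min(count, 3)
theorem algInner_eq (l : List Char) : ∀ c : Int, 0 ≤ c → c ≤ 3 →
    algInner l c = min (c + (l.countP algDigitEven : Int)) 3 := by
  induction l with
  | nil => intro c h0 h3; simp [algInner]; omega
  | cons el rest ih =>
    intro c h0 h3
    simp only [algInner]
    by_cases hbr : c > 2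
    · rw [if_pos hbr]
      have : (((el :: rest).countP algDigitEven : Nat) : Int) ≥ 0 := by positivity
      omega
    · rw [if_neg hbr, List.countP_cons]
      by_cases he : algDigitEven el
      · rw [if_pos he, ih (c + 1) (by omega) (by omega)]
        simp [he]; omega
      · rw [if_neg he, ih c h0 h3]
        simp [he]

-- A's per-number test equals B's table value test
theorem per_number (m : Int) (hm : 0 < m) :
    (algInner (PySem.Int.toStr m).toList 0 < 3) ↔ ((evCount m.toNat : Int) < 3) := by
  rw [PySem.Int.toList_toStr, algInner_eq _ 0 le_rfl (by norm_num), countP_toChars m hm]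
  omega

-- B's step function, named for the proofs
def bstep : Array Int × List Int → Int → Array Int × List Int := fun st m =>
  let v := st.1.getD (PySem.Int.floordiv m 10).toNat 0 +
           (if PySem.Int.mod m 2 == 0 then (1 : Int) else 0)
  let c := st.1.set! m.toNat v
  if c.getD m.toNat 0 < 3 then (c, st.2 ++ [m]) else (c, st.2)

theorem alg_alt_eq (n : Int) : alg_alt n =
    ((PySem.List.pyRange 1 n 1).foldl bstep
      (Array.replicate (if n > 1 then n else 1).toNat 0, ([] : List Int))).2 := rfl

theorem floordiv_ten_toNat (j : Int) (h : 0 ≤ j) :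
    (PySem.Int.floordiv j 10).toNat = j.toNat / 10 := by
  simp [PySem.Int.floordiv, Int.fdiv_eq_ediv]
  omega

theorem mod_two_beq (j : Int) (h : 0 ≤ j) :
    (PySem.Int.mod j 2 == 0) = decide (j.toNat % 2 = 0) := by
  have h2 : PySem.Int.mod j 2 = j % 2 := by simp [PySem.Int.mod, Int.fmod_eq_emod]
  rw [h2]
  by_cases hp : j.toNat % 2 = 0
  · simp [hp]; omega
  · simp [hp]; omega

theorem getD_set_self (a : Array Int) (i : Nat) (v : Int) (h : i < a.size) :
    (a.set! i v).getD i 0 = v := by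
  simp [Array.set!, Array.getD, h]

theorem getD_set_ne (a : Array Int) (i k : Nat) (v : Int) (hne : k ≠ i) :
    (a.set! i v).getD k 0 = a.getD k 0 := by
  simp [Array.set!, Array.getD]
  split <;> simp_all [hne.symm]

theorem getD_replicate (s k : Nat) : (Array.replicate s (0 : Int)).getD k 0 = 0 := by
  simp [Array.getD]

theorem foldB (n : Int) : ∀ (fuel : Nat) (j : Int) (c : Array Int) (out : List Int),
    1 ≤ j → (n - j).toNat = fuel → c.size = n.toNat →
    (∀ k : Nat, k < j.toNat → c.getD k 0 = (evCount k : Int)) →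
    ((PySem.List.pyRange j n 1).foldl bstep (c, out)).2
      = out ++ (PySem.List.pyRange j n 1).filter (fun m => decide ((evCount m.toNat : Int) < 3)) := by
  intro fuel
  induction fuel with
  | zero =>
    intro j c out hj hf _ _
    rw [PySem.List.pyRange_one_eq_nil (by omega)]
    simp
  | succ fuel ih =>
    intro j c out hj hf hsz hinv
    have hjn : j < n := by omega
    have hj0 : 0 ≤ j := by omega
    have hjsz : j.toNat < c.size := by rw [hsz]; omega
    have hv : c.getD (PySem.Int.floordiv j 10).toNat 0 +
        (if PySem.Int.mod j 2 == 0 then (1 : Int) else 0) = (evCount j.toNat : Int) := by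
      rw [floordiv_ten_toNat j hj0, hinv _ (Nat.div_lt_self (by omega) (by omega)),
        mod_two_beq j hj0, evCount_pos j.toNat (by omega)]
      by_cases hp : j.toNat % 2 = 0
      · rw [if_pos (by simp [hp]), if_pos hp]; push_cast; ring
      · rw [if_neg (by simp [hp]), if_neg hp]; push_cast; ring
    have hb : bstep (c, out) j =
        ((c.set! j.toNat ((evCount j.toNat : Int))),
         if (evCount j.toNat : Int) < 3 then out ++ [j] else out) := by
      simp only [bstep]
      rw [hv, getD_set_self _ _ _ hjsz]
      split <;> rfl
    rw [PySem.List.pyRange_one_cons hjn, List.foldl_cons, hb,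
      ih (j + 1) _ _ (by omega) (by omega)
        (by rw [Array.size_set!]; exact hsz)
        (by
          intro k hk
          by_cases hkj : k = j.toNat
          · subst hkj; exact getD_set_self _ _ _ hjsz
          · rw [getD_set_ne _ _ _ _ hkj]
            exact hinv k (by omega))]
    by_cases hc : (evCount j.toNat : Int) < 3
    · simp [List.filter_cons, hc]
      omega
    · simp [List.filter_cons, hc]
      omega

-- ===== VERDICT (by name: the statement is the Claim_ definition above) =====
theorem alg_spec : Claim_equal_alg := by
  intro n _
  unfold Spec_alg
  by_cases hn : 1 < n
  · rw [alg_alt_eq,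
      foldB n (n - 1).toNat 1 _ [] le_rfl rfl
        (by rw [Array.size_replicate, if_pos hn])
        (by
          intro k hk
          have hk0 : k = 0 := by omega
          subst hk0
          rw [getD_replicate]
          simp [evCount]),
      List.nil_append]
    unfold alg
    show List.foldl (fun a number =>
        if algInner (PySem.Int.toStr number).toList 0 < 3 then a ++ [number] else a) [] _ = _
    rw [show (fun (a : List Int) number =>
          if algInner (PySem.Int.toStr number).toList 0 < 3 then a ++ [number] else a) =
        (fun a number =>
          if decide (algInner (PySem.Int.toStr number).toList 0 < 3) = true
          then a ++ [number] else a) from by funext a x; simp,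
      PySem.List.foldl_append_if (f := fun x => x), List.nil_append, List.map_id']
    apply List.filter_congr
    intro m hm
    have h1 : 0 < m := by
      have := (PySem.List.mem_pyRange_one.mp hm).1
      omega
    simpa using per_number m h1
  · have hnil : PySem.List.pyRange 1 n 1 = [] := PySem.List.pyRange_one_eq_nil (by omega)
    rw [alg_alt_eq]
    unfold alg
    rw [hnil]
    simp
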